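-- pv_equiv track=rewrite | github.com/ProjectBA14/pm-internship-allocation-engine | backend/services/matching_service.py | _is_related_category
-- ===== SOURCE A (Python) =====
-- def _is_related_category(cat1: str, cat2: str) -> bool:
--     """Check if two categories are related"""
--     related_categories = {
--         'software development': ['programming', 'web development', 'mobile development'],
--         'data science': ['machine learning', 'analytics', 'ai'],
--         'digital marketing': ['marketing', 'social media', 'content'],
--         'design': ['ui/ux', 'graphic design', 'visual design'],
--     }
--
--     cat1_lower = cat1.lower()
--     cat2_lower = cat2.lower()
--
--     for main_cat, related in related_categories.items():
--         if (cat1_lower == main_cat and cat2_lower in related) or \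
--            (cat2_lower == main_cat and cat1_lower in related):
--             return True
--
--     return False
-- ===== SOURCE B (Python) =====
-- def _is_related_category(cat1: str, cat2: str) -> bool:
--     """Check if two categories are related"""
--     related_categories = {
--         'software development': ['programming', 'web development', 'mobile development'],
--         'data science': ['machine learning', 'analytics', 'ai'],
--         'digital marketing': ['marketing', 'social media', 'content'],
--         'design': ['ui/ux', 'graphic design', 'visual design'],
--     }
--     pairs = {tuple(sorted((main_cat, r)))
--              for main_cat, related in related_categories.items()
--              for r in related}
--     return tuple(sorted((cat1.lower(), cat2.lower()))) in pairs
-- ===== Notes on version B (the rewrite author's own statement) =====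
-- stated objective: idiomatic
-- what changed: Replaced the loop over the relation table with its two symmetric OR-branches by a precomputed set of canonically sorted category pairs and a single membership test of the sorted input pair.
import Mathlib
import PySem

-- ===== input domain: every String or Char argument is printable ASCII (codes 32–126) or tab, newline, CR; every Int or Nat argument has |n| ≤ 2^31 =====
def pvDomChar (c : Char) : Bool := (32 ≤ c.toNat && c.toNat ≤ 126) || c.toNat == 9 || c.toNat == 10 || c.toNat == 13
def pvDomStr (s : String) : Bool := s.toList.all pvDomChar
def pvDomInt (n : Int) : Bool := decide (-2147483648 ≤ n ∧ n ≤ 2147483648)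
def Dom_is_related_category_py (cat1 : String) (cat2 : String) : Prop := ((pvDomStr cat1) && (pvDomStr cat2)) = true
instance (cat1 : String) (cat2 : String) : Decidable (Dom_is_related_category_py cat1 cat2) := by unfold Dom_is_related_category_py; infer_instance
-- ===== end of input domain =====

-- B replaces A's table loop with two symmetric OR-branches by a precomputed set of
-- sorted category pairs and one membership test of the sorted input pair (idiomatic).


-- the related_categories dict literal, shared verbatim by both programs
def relatedTable : List (String × List String) :=
  [("software development", ["programming", "web development", "mobile development"]),
   ("data science", ["machine learning", "analytics", "ai"]),
   ("digital marketing", ["marketing", "social media", "content"]),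
   ("design", ["ui/ux", "graphic design", "visual design"])]

-- ===== PORT A =====
-- the for-loop with early 'return True' and final 'return False' is List.any over the items
def is_related_category_py (cat1 : String) (cat2 : String) : Bool :=
  let cat1_lower := PySem.Str.lower cat1
  let cat2_lower := PySem.Str.lower cat2
  relatedTable.any (fun mr =>
    (cat1_lower == mr.1 && mr.2.contains cat2_lower) ||
    (cat2_lower == mr.1 && mr.2.contains cat1_lower))

-- ===== PORT B =====
-- tuple(sorted((a, b))) for two strings
def sortPair (a : String) (b : String) : String × String := if a ≤ b then (a, b) else (b, a)

-- pairs = {tuple(sorted((main_cat, r))) for main_cat, related in ... for r in related}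
def relatedPairs : PySem.Set (String × String) :=
  PySem.Set.ofList (relatedTable.flatMap (fun mr => mr.2.map (fun r => sortPair mr.1 r)))

def is_related_category_py_alt (cat1 : String) (cat2 : String) : Bool :=
  PySem.Set.contains relatedPairs (sortPair (PySem.Str.lower cat1) (PySem.Str.lower cat2))

-- ===== PRECONDITION & SPEC =====
def Spec_is_related_category_py (cat1 : String) (cat2 : String) (out : Bool) : Prop := out = is_related_category_py_alt cat1 cat2
instance (cat1 : String) (cat2 : String) (out : Bool) : Decidable (Spec_is_related_category_py cat1 cat2 out) := by unfold Spec_is_related_category_py; infer_instance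

-- ===== CLAIM (what is proved, stated in full; the proofs are below) =====
def Claim_equal_is_related_category_py : Prop := ∀ (cat1 : String) (cat2 : String), Dom_is_related_category_py cat1 cat2 → Spec_is_related_category_py cat1 cat2 (is_related_category_py cat1 cat2)

-- ===== LEMMAS AND PROOFS =====

-- sorting canonicalises an unordered pair: two pairs sort equal iff they are the same
-- two strings in either order (needs m ≠ r so the two orders are distinguishable)
theorem sortPair_eq_sortPair (a b m r : String) (h : m ≠ r) :
    sortPair a b = sortPair m r ↔ (a = m ∧ b = r) ∨ (b = m ∧ a = r) := by
  unfold sortPair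
  split_ifs with h1 h2 h2 <;> simp only [Prod.mk.injEq] <;> constructor
  · rintro ⟨rfl, rfl⟩; exact Or.inl ⟨rfl, rfl⟩
  · rintro (⟨rfl, rfl⟩ | ⟨rfl, rfl⟩)
    · exact ⟨rfl, rfl⟩
    · exact absurd (le_antisymm h2 h1) h
  · rintro ⟨rfl, rfl⟩; exact Or.inr ⟨rfl, rfl⟩
  · rintro (⟨rfl, rfl⟩ | ⟨rfl, rfl⟩)
    · exact absurd h1 h2
    · exact ⟨rfl, rfl⟩
  · rintro ⟨rfl, rfl⟩; exact Or.inr ⟨rfl, rfl⟩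
  · rintro (⟨rfl, rfl⟩ | ⟨rfl, rfl⟩)
    · exact absurd h2 h1
    · exact ⟨rfl, rfl⟩
  · rintro ⟨rfl, rfl⟩; exact Or.inl ⟨rfl, rfl⟩
  · rintro (⟨rfl, rfl⟩ | ⟨rfl, rfl⟩)
    · exact ⟨rfl, rfl⟩
    · exact absurd ((not_le.mp h1).le) h2

theorem core (a b : String) :
    (relatedTable.any (fun mr =>
      (a == mr.1 && mr.2.contains b) || (b == mr.1 && mr.2.contains a)))
    = PySem.Set.contains relatedPairs (sortPair a b) := by
  have hdist : ∀ mr ∈ relatedTable, ∀ r ∈ mr.2, mr.1 ≠ r := by decide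
  rw [Bool.eq_iff_iff]
  simp only [relatedPairs, PySem.Set.contains_iff, PySem.Set.mem_ofList,
    List.any_eq_true, List.contains_eq_mem, Bool.or_eq_true, Bool.and_eq_true,
    beq_iff_eq, decide_eq_true_eq, List.mem_flatMap, List.mem_map]
  constructor
  · rintro ⟨mr, hmr, ⟨ha, hb⟩ | ⟨hb, ha⟩⟩
    · exact ⟨mr, hmr, b, hb,
        ((sortPair_eq_sortPair a b mr.1 b (ha ▸ hdist mr hmr b hb)).mpr (Or.inl ⟨ha, rfl⟩)).symm⟩
    · exact ⟨mr, hmr, a, ha,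
        ((sortPair_eq_sortPair a b mr.1 a (hb ▸ hdist mr hmr a ha)).mpr (Or.inr ⟨hb, rfl⟩)).symm⟩
  · rintro ⟨mr, hmr, r, hr, heq⟩
    rcases (sortPair_eq_sortPair a b mr.1 r (hdist mr hmr r hr)).mp heq.symm with ⟨ha, hb⟩ | ⟨hb, ha⟩
    · exact ⟨mr, hmr, Or.inl ⟨ha, hb ▸ hr⟩⟩
    · exact ⟨mr, hmr, Or.inr ⟨hb, ha ▸ hr⟩⟩

-- ===== VERDICT (by name: the statement is the Claim_ definition above) =====
theorem is_related_category_py_spec : Claim_equal_is_related_category_py := by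
  intro cat1 cat2 _
  unfold Spec_is_related_category_py is_related_category_py is_related_category_py_alt
  exact core (PySem.Str.lower cat1) (PySem.Str.lower cat2)
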